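-- pv_equiv track=rewrite | github.com/MingYuanTina/Project | Algorithm341/PythonLib/String.py | len_convert_to_anagram
-- ===== SOURCE A (Python) =====
-- def len_convert_to_anagram(s):
-- 	l = list(s)
-- 	if not len(l) % 2 == 0: # base case
-- 		return -1
-- 	# other case
-- 	mid = int(len(l) / 2)
-- 	d = {}
-- 	# runtime optimization
-- 	for i in range(mid, len(l)):
-- 		if l[i] not in d.keys():
-- 			d[l[i]] = 1
-- 		else:
-- 			d[l[i]] += 1
-- 	# algorithm
-- 	c = 0
-- 	for i in range(0, mid):
-- 		if l[i] in d.keys():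
-- 			if d[l[i]] > 0:
-- 					d[l[i]] -= 1
-- 					c += 1
-- 			else:
-- 				del d[l[i]]
-- 	return mid - c
-- ===== SOURCE B (Python) =====
-- def len_convert_to_anagram(s):
--     if len(s) % 2:
--         return -1
--     mid = len(s) // 2
--     first, second = s[:mid], s[mid:]
--     return mid - sum(min(first.count(ch), second.count(ch)) for ch in set(first))
-- ===== Notes on version B (the rewrite author's own statement) =====
-- stated objective: idiomatic
-- what changed: Replaces A's hand-built dict plus decrement/delete matching loop with a direct multiset-intersection count: sum over the distinct characters of the first half of min(count in first half, count in second half).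
import Mathlib
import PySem

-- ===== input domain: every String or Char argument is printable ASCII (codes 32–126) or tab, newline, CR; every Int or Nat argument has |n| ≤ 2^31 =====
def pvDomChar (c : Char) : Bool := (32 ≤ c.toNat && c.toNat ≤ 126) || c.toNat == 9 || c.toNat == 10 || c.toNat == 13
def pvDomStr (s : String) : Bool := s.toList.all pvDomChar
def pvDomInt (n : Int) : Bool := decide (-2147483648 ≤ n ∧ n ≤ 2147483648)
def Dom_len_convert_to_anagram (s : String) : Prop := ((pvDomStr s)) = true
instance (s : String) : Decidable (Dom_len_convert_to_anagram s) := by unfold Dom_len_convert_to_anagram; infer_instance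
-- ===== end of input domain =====

-- B replaces A's dict-building + decrement/delete matching loops by a direct multiset-intersection
-- count (sum of per-character min counts of the two halves) — objective: more idiomatic, same cost.

-- ===== PORT A =====
-- A-side helper: the body of A's first loop ('if l[i] not in d: d[l[i]] = 1 else: d[l[i]] += 1')
def pvBodyCount (d : PySem.Dict Char Int) (x : Char) : PySem.Dict Char Int :=
  if d.contains x = false then d.insert x 1 else d.insert x (d.getD x 0 + 1)

-- A-side helper: the body of A's second loop (match against d, decrement / delete / skip)
def pvBodyMatch (st : PySem.Dict Char Int × Int) (x : Char) : PySem.Dict Char Int × Int :=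
  if st.1.contains x then
    (if st.1.getD x 0 > 0 then (st.1.insert x (st.1.getD x 0 - 1), st.2 + 1)
     else (st.1.erase x, st.2))
  else st

def len_convert_to_anagram (s : String) : Int :=
  let l := s.toList
  if !(l.length % 2 == 0) then -1          -- if not len(l) % 2 == 0: return -1
  else
    let mid := l.length / 2                -- int(len(l)/2): exact, length is even here
    let d := (PySem.List.pyRange (mid : Int) (PySem.List.len l)).foldl
               (fun d i => pvBodyCount d (PySem.List.pyGetD l i ' ')) PySem.Dict.empty
    let r := (PySem.List.pyRange 0 (mid : Int)).foldl
               (fun st i => pvBodyMatch st (PySem.List.pyGetD l i ' ')) (d, (0 : Int))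
    (mid : Int) - r.2

-- ===== PORT B =====
def len_convert_to_anagram_alt (s : String) : Int :=
  let cs := s.toList
  if cs.length % 2 ≠ 0 then -1             -- if len(s) % 2: return -1
  else
    let mid := cs.length / 2
    let first := cs.take mid               -- s[:mid]
    let second := cs.drop mid              -- s[mid:]
    (mid : Int) -
      ((PySem.Set.ofList first).map
        (fun ch => ((min (first.count ch) (second.count ch) : Nat) : Int))).sum

-- ===== PRECONDITION & SPEC =====
def Spec_len_convert_to_anagram (s : String) (out : Int) : Prop := out = len_convert_to_anagram_alt s
instance (s : String) (out : Int) : Decidable (Spec_len_convert_to_anagram s out) := by unfold Spec_len_convert_to_anagram; infer_instance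

-- ===== CLAIM (what is proved, stated in full; the proofs are below) =====
def Claim_equal_len_convert_to_anagram : Prop := ∀ (s : String), Dom_len_convert_to_anagram s → Spec_len_convert_to_anagram s (len_convert_to_anagram s)

-- ===== LEMMAS AND PROOFS =====

-- greedy matching of a list of characters against an availability table
def pvGreedy : List Char → (Char → Nat) → Nat
  | [], _ => 0
  | x :: xs, a =>
      if a x > 0 then 1 + pvGreedy xs (fun ch => if ch = x then a x - 1 else a ch)
      else pvGreedy xs a

-- availability a dict state offers: value if the key is present, else 0
def pvAvail (d : PySem.Dict Char Int) (ch : Char) : Nat :=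
  if d.contains ch then (d.getD ch 0).toNat else 0

-- dict.erase lemmas (not in the prelude): erase filters the key's entries out of items
theorem pv_contains_erase_self (d : PySem.Dict Char Int) (k : Char) :
    (d.erase k).contains k = false := by
  simp [PySem.Dict.erase, PySem.Dict.contains, List.any_filter]

theorem pv_contains_erase_of_ne (d : PySem.Dict Char Int) {k ch : Char} (h : ch ≠ k) :
    (d.erase k).contains ch = d.contains ch := by
  obtain ⟨items⟩ := d
  simp only [PySem.Dict.erase, PySem.Dict.contains]
  induction items with
  | nil => rfl
  | cons p rest ih =>
      by_cases hp : p.1 = k <;> by_cases hc : p.1 = ch <;>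
        simp_all [List.any_cons]

theorem pv_getD_erase_of_ne (d : PySem.Dict Char Int) {k ch : Char} (h : ch ≠ k) (v : Int) :
    (d.erase k).getD ch v = d.getD ch v := by
  obtain ⟨items⟩ := d
  simp only [PySem.Dict.erase, PySem.Dict.getD, PySem.Dict.get?]
  induction items with
  | nil => rfl
  | cons p rest ih =>
      by_cases hp : p.1 = k <;> by_cases hc : p.1 = ch <;>
        simp_all

-- A's first-loop body is exactly 'insert x (getD x 0 + 1)'
theorem pvBodyCount_eq (d : PySem.Dict Char Int) (x : Char) :
    pvBodyCount d x = d.insert x (d.getD x 0 + 1) := by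
  by_cases hc : d.contains x
  · simp [pvBodyCount, hc]
  · rw [pvBodyCount]
    simp only [Bool.not_eq_true] at hc
    rw [if_pos (by simp [hc]), PySem.Dict.getD_of_not_contains d 0 hc]
    norm_num

-- A's first loop builds Counter(l[mid:])
theorem pv_loop1_eq (l : List Char) (mid : Nat) :
    (PySem.List.pyRange (mid : Int) (PySem.List.len l)).foldl
        (fun d i => pvBodyCount d (PySem.List.pyGetD l i ' ')) PySem.Dict.empty
      = PySem.Dict.counter (l.drop mid) := by
  rw [PySem.List.foldl_pyRange_pyGetD l ' ' pvBodyCount PySem.Dict.empty (by positivity)]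
  rw [Int.toNat_natCast]
  rw [PySem.List.foldl_congr_mem _ pvBodyCount _ _
        (fun acc x _ => pvBodyCount_eq acc x)]
  exact PySem.Dict.foldl_insert_getD_add_one_eq_counter _

-- A's second loop over range(0, mid) is a fold of pvBodyMatch over l[:mid]
theorem pv_loop2_range (l : List Char) (mid : Nat) (h : mid ≤ l.length)
    (init : PySem.Dict Char Int × Int) :
    (PySem.List.pyRange 0 (mid : Int)).foldl
        (fun st i => pvBodyMatch st (PySem.List.pyGetD l i ' ')) init
      = (l.take mid).foldl pvBodyMatch init := by
  have hlen : (mid : Int) = PySem.List.len (l.take mid) := by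
    simp [PySem.List.len_eq, Nat.min_eq_left h]
  rw [hlen]
  rw [PySem.List.foldl_congr_mem _ _
        (fun st i => pvBodyMatch st (PySem.List.pyGetD (l.take mid) i ' ')) init ?_]
  · exact PySem.List.foldl_pyRange_zero_pyGetD (l.take mid) ' ' pvBodyMatch init
  · intro acc i hi
    rw [PySem.List.mem_pyRange_iff_of_pos (by norm_num)] at hi
    obtain ⟨h0, hlt, -⟩ := hi
    rw [← hlen] at hlt
    obtain ⟨n, rfl⟩ : ∃ n : Nat, i = (n : Int) := ⟨i.toNat, (Int.toNat_of_nonneg h0).symm⟩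
    have hn : n < mid := by exact_mod_cast hlt
    simp only [PySem.List.pyGetD_natCast]
    simp [List.getD_eq_getElem?_getD, hn]

-- the matching loop counts greedy matches against the availability of the dict
theorem pv_loop2_eq (p : List Char) :
    ∀ (d : PySem.Dict Char Int) (c : Int),
      (∀ ch, d.contains ch = true → 0 ≤ d.getD ch 0) →
      (p.foldl pvBodyMatch (d, c)).2 = c + (pvGreedy p (pvAvail d) : Int) := by
  induction p with
  | nil => intro d c _; simp [pvGreedy]
  | cons x xs ih =>
    intro d c hgood
    by_cases hc : d.contains x
    · by_cases hpos : d.getD x 0 > 0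
      · have havx : pvAvail d x = (d.getD x 0).toNat := by simp [pvAvail, hc]
        have hstep : pvBodyMatch (d, c) x = (d.insert x (d.getD x 0 - 1), c + 1) := by
          simp [pvBodyMatch, hc, hpos]
        have hgood' : ∀ ch, (d.insert x (d.getD x 0 - 1)).contains ch = true →
            0 ≤ (d.insert x (d.getD x 0 - 1)).getD ch 0 := by
          intro ch hch
          rw [PySem.Dict.getD_insert]
          split_ifs with he
          · omega
          · rw [PySem.Dict.contains_insert] at hch
            simp [he] at hch
            exact hgood ch hch
        have havail : pvAvail (d.insert x (d.getD x 0 - 1))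
            = fun ch => if ch = x then pvAvail d x - 1 else pvAvail d ch := by
          funext ch
          by_cases he : ch = x
          · subst he
            simp only [pvAvail, PySem.Dict.contains_insert, PySem.Dict.getD_insert,
              beq_self_eq_true, Bool.true_or, if_pos, hc]
            omega
          · simp only [pvAvail, PySem.Dict.contains_insert,
              PySem.Dict.getD_insert, if_neg he]
            simp [he]
        have hgx : pvGreedy (x :: xs) (pvAvail d)
            = 1 + pvGreedy xs (fun ch => if ch = x then pvAvail d x - 1 else pvAvail d ch) := by
          rw [pvGreedy]
          rw [if_pos (by rw [havx]; omega)]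
        rw [List.foldl_cons, hstep, ih _ _ hgood', havail, hgx]
        push_cast; ring
      · have hz : d.getD x 0 = 0 := le_antisymm (by omega) (hgood x hc)
        have havx : pvAvail d x = 0 := by simp [pvAvail, hc, hz]
        have hstep : pvBodyMatch (d, c) x = (d.erase x, c) := by
          simp [pvBodyMatch, hc, hpos]
        have hgood' : ∀ ch, (d.erase x).contains ch = true → 0 ≤ (d.erase x).getD ch 0 := by
          intro ch hch
          by_cases he : ch = x
          · subst he; rw [pv_contains_erase_self] at hch; cases hch
          · rw [pv_contains_erase_of_ne d he] at hch
            rw [pv_getD_erase_of_ne d he]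
            exact hgood ch hch
        have havail : pvAvail (d.erase x) = pvAvail d := by
          funext ch
          by_cases he : ch = x
          · subst he; simp [pvAvail, pv_contains_erase_self, hc, hz]
          · simp [pvAvail, pv_contains_erase_of_ne d he, pv_getD_erase_of_ne d he]
        have hgx : pvGreedy (x :: xs) (pvAvail d) = pvGreedy xs (pvAvail d) := by
          rw [pvGreedy, if_neg (by omega)]
        rw [List.foldl_cons, hstep, ih _ _ hgood', havail, hgx]
    · have havx : pvAvail d x = 0 := by simp [pvAvail, hc]
      have hstep : pvBodyMatch (d, c) x = (d, c) := by simp [pvBodyMatch, hc]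
      have hgx : pvGreedy (x :: xs) (pvAvail d) = pvGreedy xs (pvAvail d) := by
        rw [pvGreedy, if_neg (by omega)]
      rw [List.foldl_cons, hstep, ih _ _ hgood, hgx]

-- the availability of Counter(xs) is the count in xs
theorem pv_avail_counter (xs : List Char) :
    pvAvail (PySem.Dict.counter xs) = fun ch => xs.count ch := by
  funext ch
  by_cases hm : ch ∈ xs
  · simp [pvAvail, PySem.Dict.contains_counter, hm, PySem.Dict.getD_counter]
  · simp [pvAvail, PySem.Dict.contains_counter, hm, List.count_eq_zero_of_not_mem hm]

-- a sum gains exactly 1 when f exceeds g at the single occurrence of x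
theorem pv_sum_succ_at {f g : Char → Nat} (x : Char) :
    ∀ (S : List Char), S.Nodup → x ∈ S → (∀ ch, ch ≠ x → f ch = g ch) → f x = g x + 1 →
      (S.map f).sum = (S.map g).sum + 1 := by
  intro S
  induction S with
  | nil => intro _ hx; cases hx
  | cons y S' ih =>
    intro hnd hx hne hfx
    by_cases hy : y = x
    · subst hy
      have : S'.map f = S'.map g := by
        apply List.map_congr_left
        intro ch hch
        exact hne ch (by rintro rfl; exact (List.nodup_cons.mp hnd).1 hch)
      simp only [List.map_cons, List.sum_cons, this, hfx]
      omega
    · have hx' : x ∈ S' := by cases hx with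
        | head => exact absurd rfl hy
        | tail _ h => exact h
      simp only [List.map_cons, List.sum_cons,
        ih (List.nodup_cons.mp hnd).2 hx' hne hfx, hne y hy]
      omega

-- B's per-character min-count sum equals the greedy match count
theorem pv_sum_min_eq_greedy (l : List Char) :
    ∀ (a : Char → Nat) (S : List Char), S.Nodup → (∀ ch ∈ l, ch ∈ S) →
      (S.map (fun ch => min (l.count ch) (a ch))).sum = pvGreedy l a := by
  induction l with
  | nil =>
    intro a S _ _
    have h0 : S.map (fun ch => min (([] : List Char).count ch) (a ch)) = S.map (fun _ => 0) := by
      apply List.map_congr_left; intro ch _; simp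
    rw [h0]; simp [pvGreedy]
  | cons x xs ih =>
    intro a S hnd hmem
    have hxS : x ∈ S := hmem x (List.mem_cons_self)
    by_cases hax : a x = 0
    · have heq : S.map (fun ch => min ((x :: xs).count ch) (a ch))
          = S.map (fun ch => min (xs.count ch) (a ch)) := by
        apply List.map_congr_left
        intro ch _
        by_cases he : ch = x
        · subst he; simp [hax]
        · simp [List.count_cons, if_neg (Ne.symm he)]
      rw [heq, ih a S hnd (fun ch h => hmem ch (List.mem_cons_of_mem x h)),
        pvGreedy, if_neg (by omega)]
    · rw [pvGreedy, if_pos (by omega)]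
      have hg := ih (fun ch => if ch = x then a x - 1 else a ch) S hnd
        (fun ch h => hmem ch (List.mem_cons_of_mem x h))
      rw [pv_sum_succ_at (f := fun ch => min ((x :: xs).count ch) (a ch))
            (g := fun ch => min (xs.count ch) (if ch = x then a x - 1 else a ch))
            x S hnd hxS ?_ ?_, hg]
      · omega
      · intro ch he
        simp [List.count_cons, if_neg (Ne.symm he), if_neg he]
      · simp
        omega

-- ===== VERDICT (by name: the statement is the Claim_ definition above) =====
theorem len_convert_to_anagram_spec : Claim_equal_len_convert_to_anagram := by
  intro s _
  unfold Spec_len_convert_to_anagram len_convert_to_anagram len_convert_to_anagram_alt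
  set l := s.toList with hl
  by_cases hp : l.length % 2 = 0
  · simp only [hp, beq_self_eq_true, Bool.not_true, Bool.false_eq_true, ne_eq,
      not_true_eq_false, if_neg, not_false_eq_true]
    set mid := l.length / 2 with hmid
    have hle : mid ≤ l.length := Nat.div_le_self _ _
    rw [pv_loop1_eq l mid, pv_loop2_range l mid hle,
        pv_loop2_eq (l.take mid) _ 0
          (fun ch hch => by rw [PySem.Dict.getD_counter]; positivity),
        pv_avail_counter, zero_add]
    have hsum := pv_sum_min_eq_greedy (l.take mid) (fun ch => (l.drop mid).count ch)
          (PySem.Set.ofList (l.take mid)) (PySem.Set.nodup_ofList _)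
          (fun ch h => (PySem.Set.mem_ofList _ ch).mpr h)
    have hcast : (List.map (fun ch => ((min ((l.take mid).count ch) ((l.drop mid).count ch) : Nat) : Int))
          (PySem.Set.ofList (l.take mid))).sum
        = (pvGreedy (l.take mid) (fun ch => (l.drop mid).count ch) : Int) := by
      rw [← hsum, Nat.cast_list_sum, List.map_map]
      rfl
    rw [hcast]
  · simp [hp]
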